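-- pv_equiv track=rewrite | github.com/Project-Navi/navi-SAD | src/navi_sad/pilot/helpers.py | extract_leading_span
-- ===== SOURCE A (Python) =====
-- def extract_leading_span(text: str) -> tuple[str, str]:
--     """Extract the leading answer span from decoded generation text.
--
--     Strips leading/trailing whitespace, then finds the earliest
--     structural break among: ``\\n``, ``. `` (period-space),
--     ``.\\n`` (period-newline). Returns the text before the break
--     (raw, not lowercased) and the stop reason.
--
--     Returns:
--         (span, stop_reason) where stop_reason is one of:
--         newline, period_space, period_newline, eos.
--     """
--     text = text.strip()
--     if not text:
--         return ("", "eos")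
--
--     for i, ch in enumerate(text):
--         # Period-based breaks checked first at each position.
--         # A period at position i is always before a newline at i+1,
--         # so .\n is naturally found before a bare \n one position later.
--         if ch == "." and i + 1 < len(text):
--             next_ch = text[i + 1]
--             if next_ch == " ":
--                 return (text[:i], "period_space")
--             if next_ch == "\n":
--                 return (text[:i], "period_newline")
--         if ch == "\n":
--             return (text[:i], "newline")
--
--     return (text, "eos")
-- ===== SOURCE B (Python) =====
-- def extract_leading_span(text: str) -> tuple[str, str]:
--     text = text.strip()
--     if not text:
--         return ("", "eos")
--     cands = []
--     i = text.find(".\n")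
--     if i != -1:
--         cands.append((i, "period_newline"))
--     i = text.find(". ")
--     if i != -1:
--         cands.append((i, "period_space"))
--     i = text.find("\n")
--     if i != -1:
--         cands.append((i, "newline"))
--     if not cands:
--         return (text, "eos")
--     idx, reason = min(cands, key=lambda c: c[0])
--     return (text[:idx], reason)
-- ===== Notes on version B (the rewrite author's own statement) =====
-- stated objective: idiomatic
-- what changed: A's per-character enumerate loop with nested next-char checks is replaced by three str.find calls (one per break pattern) and a min over the found break positions; distinct patterns can never break at the same index, so the minimum reproduces A's positional priority.
import Mathlib
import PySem

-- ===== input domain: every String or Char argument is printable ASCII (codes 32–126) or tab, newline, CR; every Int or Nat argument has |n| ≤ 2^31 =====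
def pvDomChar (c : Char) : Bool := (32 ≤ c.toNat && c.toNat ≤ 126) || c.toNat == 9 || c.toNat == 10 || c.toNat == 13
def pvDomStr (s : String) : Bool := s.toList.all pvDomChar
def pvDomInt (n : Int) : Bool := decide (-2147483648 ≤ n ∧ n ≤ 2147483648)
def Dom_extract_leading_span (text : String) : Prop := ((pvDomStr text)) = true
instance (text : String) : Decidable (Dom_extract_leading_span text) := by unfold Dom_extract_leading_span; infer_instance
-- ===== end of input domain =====

-- B replaces A's per-character scan with three substring finds and a min over the break positions (idiomatic use of str.find).

-- ===== PORT A =====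
-- A's 'for i, ch in enumerate(text)' loop with early returns, as structural recursion over the remaining characters.
def spanLoopA (t : List Char) : Nat → List Char → String × String
  | _, [] => (String.ofList t, "eos")
  | i, ch :: rest =>
    if ch = '.' ∧ i + 1 < t.length then
      let nc := PySem.List.pyGetD t ((i : Int) + 1) 'x'
      if nc = ' ' then (String.ofList (PySem.List.slice t none (some (i : Int))), "period_space")
      else if nc = '\n' then (String.ofList (PySem.List.slice t none (some (i : Int))), "period_newline")
      else if ch = '\n' then (String.ofList (PySem.List.slice t none (some (i : Int))), "newline")
      else spanLoopA t (i + 1) rest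
    else if ch = '\n' then (String.ofList (PySem.List.slice t none (some (i : Int))), "newline")
    else spanLoopA t (i + 1) rest

def extract_leading_span (text : String) : String × String :=
  let t := PySem.Chars.strip text.toList
  if t = [] then ("", "eos") else spanLoopA t 0 t

-- ===== PORT B =====
def extract_leading_span_alt (text : String) : String × String :=
  let t := PySem.Chars.strip text.toList
  if t = [] then ("", "eos")
  else
    let cands : List (Int × String) := []
    let iPn := PySem.Chars.find t ['.', '\n']
    let cands := if iPn ≠ -1 then cands ++ [(iPn, "period_newline")] else cands
    let iPs := PySem.Chars.find t ['.', ' ']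
    let cands := if iPs ≠ -1 then cands ++ [(iPs, "period_space")] else cands
    let iNl := PySem.Chars.find t ['\n']
    let cands := if iNl ≠ -1 then cands ++ [(iNl, "newline")] else cands
    match PySem.List.min? cands (fun c => c.1) with
    | none => (String.ofList t, "eos")
    | some c => (String.ofList (PySem.List.slice t none (some c.1)), c.2)

-- ===== PRECONDITION & SPEC =====
def Spec_extract_leading_span (text : String) (out : String × String) : Prop := out = extract_leading_span_alt text
instance (text : String) (out : String × String) : Decidable (Spec_extract_leading_span text out) := by unfold Spec_extract_leading_span; infer_instance

-- ===== CLAIM (what is proved, stated in full; the proofs are below) =====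
def Claim_equal_extract_leading_span : Prop := ∀ (text : String), Dom_extract_leading_span text → Spec_extract_leading_span text (extract_leading_span text)

-- ===== LEMMAS AND PROOFS =====

-- Canonical description of the result: the earliest structural break and its reason.
def breakAtB (t : List Char) (j : Nat) : Bool :=
  decide (['.', ' '] <+: t.drop j) || decide (['.', '\n'] <+: t.drop j) || decide (['\n'] <+: t.drop j)

def reasonAt (t : List Char) (j : Nat) : String :=
  if ['.', ' '] <+: t.drop j then "period_space"
  else if ['.', '\n'] <+: t.drop j then "period_newline"
  else if ['\n'] <+: t.drop j then "newline"
  else "eos"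

def firstBreakFrom (t : List Char) (i : Nat) : Option Nat :=
  if h : i < t.length then
    if breakAtB t i then some i else firstBreakFrom t (i + 1)
  else none
termination_by t.length - i

def canonOut (t : List Char) (i : Nat) : String × String :=
  match firstBreakFrom t i with
  | none => (String.ofList t, "eos")
  | some j => (String.ofList (t.take j), reasonAt t j)

lemma firstBreakFrom_some (t : List Char) (i j : Nat) (h : firstBreakFrom t i = some j) :
    breakAtB t j = true ∧ ∀ k, i ≤ k → k < j → breakAtB t k = false := by
  fun_induction firstBreakFrom t i with
  | case1 i hi hb =>
    simp only [Option.some.injEq] at h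
    subst h
    exact ⟨hb, fun k hk1 hk2 => absurd hk1 (by omega)⟩
  | case2 i hi hb ih =>
    obtain ⟨h1, h2⟩ := ih h
    refine ⟨h1, fun k hk1 hk2 => ?_⟩
    rcases Nat.eq_or_lt_of_le hk1 with rfl | hlt
    · simpa using hb
    · exact h2 k hlt hk2
  | case3 i hi => simp at h

lemma firstBreakFrom_none (t : List Char) (i : Nat) (h : firstBreakFrom t i = none) :
    ∀ j, i ≤ j → breakAtB t j = false := by
  fun_induction firstBreakFrom t i with
  | case1 i hi hb => simp at h
  | case2 i hi hb ih =>
    intro j hj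
    rcases Nat.eq_or_lt_of_le hj with rfl | hlt
    · simpa using hb
    · exact ih h j hlt
  | case3 i hi =>
    intro j hj
    have hdrop : t.drop j = [] := List.drop_eq_nil_of_le (by omega)
    simp [breakAtB, hdrop]

lemma canonOut_step (t : List Char) (i : Nat) (hi : i < t.length) (hb : breakAtB t i = false) :
    canonOut t i = canonOut t (i + 1) := by
  have hfb : firstBreakFrom t i = firstBreakFrom t (i + 1) := by
    rw [firstBreakFrom, dif_pos hi, hb]
    simp
  unfold canonOut
  rw [hfb]

lemma canonOut_break (t : List Char) (i : Nat) (hi : i < t.length) (hb : breakAtB t i = true) :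
    canonOut t i = (String.ofList (t.take i), reasonAt t i) := by
  have hfb : firstBreakFrom t i = some i := by
    rw [firstBreakFrom, dif_pos hi, hb]
    simp
  unfold canonOut
  rw [hfb]

lemma spanLoopA_eq (t : List Char) : ∀ (rest : List Char) (i : Nat), t.drop i = rest →
    spanLoopA t i rest = canonOut t i := by
  intro rest
  induction rest with
  | nil =>
    intro i h
    have hlen : t.length ≤ i := List.drop_eq_nil_iff.mp h
    have hfb : firstBreakFrom t i = none := by
      rw [firstBreakFrom, dif_neg (by omega)]
    simp [spanLoopA, canonOut, hfb]
  | cons ch rest' ih =>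
    intro i h
    have hi : i < t.length := by
      have := congrArg List.length h
      simp [List.length_drop] at this
      omega
    have hdrop1 : t.drop (i + 1) = rest' := by
      have h2 : (t.drop i).tail = rest' := by rw [h]; rfl
      rwa [List.tail_drop] at h2
    have hslice : PySem.List.slice t none (some (i : Int)) = t.take i := by
      rw [PySem.List.slice_to_natCast]
    rw [spanLoopA]
    by_cases hg : ch = '.' ∧ i + 1 < t.length
    · rw [if_pos hg]
      have hrest' : rest' ≠ [] := by
        intro hcon
        rw [hcon] at hdrop1
        have := List.drop_eq_nil_iff.mp hdrop1
        omega
      obtain ⟨nc0, rest'', rfl⟩ := List.exists_cons_of_ne_nil hrest'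
      have hdropi : t.drop i = '.' :: nc0 :: rest'' := by rw [h, hg.1]
      have hnc : PySem.List.pyGetD t ((i : Int) + 1) 'x' = nc0 := by
        have hg0 : (t.drop (i + 1))[0]? = t[i + 1 + 0]? := List.getElem?_drop ..
        rw [hdrop1] at hg0
        simp only [List.getElem?_cons_zero, Nat.add_zero] at hg0
        rw [show ((i : Int) + 1) = ((i + 1 : Nat) : Int) by push_cast; ring,
            PySem.List.pyGetD_of_nonneg _ _ (by positivity)]
        simp [List.getD, ← hg0]
      rw [hnc]
      by_cases hsp : nc0 = ' '
      · rw [if_pos hsp]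
        rw [canonOut_break t i hi (by subst hsp; simp [breakAtB, hdropi, List.cons_prefix_cons]),
            hslice]
        subst hsp
        simp [reasonAt, hdropi, List.cons_prefix_cons]
      · rw [if_neg hsp]
        by_cases hnl : nc0 = '\n'
        · rw [if_pos hnl]
          subst hnl
          rw [canonOut_break t i hi (by simp [breakAtB, hdropi, List.cons_prefix_cons]), hslice]
          simp [reasonAt, hdropi, List.cons_prefix_cons]
        · rw [if_neg hnl, if_neg (by rw [hg.1]; decide)]
          rw [ih (i + 1) hdrop1, ← canonOut_step t i hi]
          simp [breakAtB, hdropi, List.cons_prefix_cons]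
          exact ⟨fun hc => hsp hc.symm, fun hc => hnl hc.symm⟩
    · rw [if_neg hg]
      by_cases hnl : ch = '\n'
      · rw [if_pos hnl]
        subst hnl
        have hdropi : t.drop i = '\n' :: rest' := h
        rw [canonOut_break t i hi (by simp [breakAtB, hdropi, List.cons_prefix_cons]), hslice]
        simp [reasonAt, hdropi, List.cons_prefix_cons]
      · rw [if_neg hnl]
        rw [ih (i + 1) hdrop1, ← canonOut_step t i hi]
        by_cases hp : ch = '.'
        · have hlen2 : ¬ i + 1 < t.length := fun hc => hg ⟨hp, hc⟩
          have hr : rest' = [] := by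
            rw [← hdrop1]
            exact List.drop_eq_nil_of_le (by omega)
          subst hp hr
          have hdropi : t.drop i = ['.'] := h
          simp [breakAtB, hdropi, List.cons_prefix_cons]
        · have hdropi : t.drop i = ch :: rest' := h
          simp [breakAtB, hdropi, List.cons_prefix_cons]
          exact ⟨⟨fun hc => absurd hc.symm hp, fun hc => absurd hc.symm hp⟩,
            fun hc => hnl hc.symm⟩

lemma find_spec (t sub : List Char) (h : PySem.Chars.find t sub ≠ -1) :
    0 ≤ PySem.Chars.find t sub ∧ sub <+: t.drop (PySem.Chars.find t sub).toNat ∧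
      ∀ k, k < (PySem.Chars.find t sub).toNat → ¬ sub <+: t.drop k := by
  have h0 := PySem.Chars.findFrom_natCast_spec t sub 0 (Nat.zero_le _)
  rw [Nat.cast_zero, PySem.Chars.findFrom_zero] at h0
  obtain ⟨h1, h2, h3⟩ := h0 h
  exact ⟨h1, h2, fun k hk => h3 k (Nat.zero_le _) hk⟩

lemma find_le_of_prefix (t sub : List Char) (k : Nat) (h : sub <+: t.drop k) :
    PySem.Chars.find t sub ≠ -1 ∧ (PySem.Chars.find t sub).toNat ≤ k := by
  have hne : PySem.Chars.find t sub ≠ -1 := by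
    rw [Ne, PySem.Chars.find_eq_neg_one_iff, not_not]
    exact h.isInfix.trans (List.drop_suffix k t).isInfix
  refine ⟨hne, ?_⟩
  by_contra hgt
  exact (find_spec t sub hne).2.2 k (by omega) h

-- bcore is B's else-branch, abstracted over the stripped character list (proof helper).
def bcore (t : List Char) : String × String :=
  let cands : List (Int × String) := []
  let iPn := PySem.Chars.find t ['.', '\n']
  let cands := if iPn ≠ -1 then cands ++ [(iPn, "period_newline")] else cands
  let iPs := PySem.Chars.find t ['.', ' ']
  let cands := if iPs ≠ -1 then cands ++ [(iPs, "period_space")] else cands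
  let iNl := PySem.Chars.find t ['\n']
  let cands := if iNl ≠ -1 then cands ++ [(iNl, "newline")] else cands
  match PySem.List.min? cands (fun c => c.1) with
  | none => (String.ofList t, "eos")
  | some c => (String.ofList (PySem.List.slice t none (some c.1)), c.2)

lemma alt_eq (text : String) :
    extract_leading_span_alt text =
      (if PySem.Chars.strip text.toList = [] then ("", "eos")
       else bcore (PySem.Chars.strip text.toList)) := rfl

lemma break_of_prefix (t sub : List Char) (k : Nat)
    (hsub : sub = ['.', ' '] ∨ sub = ['.', '\n'] ∨ sub = ['\n'])
    (h : sub <+: t.drop k) : breakAtB t k = true := by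
  rcases hsub with rfl | rfl | rfl <;> simp [breakAtB, h]

lemma bcore_case (t : List Char) (j : Nat) (rT : String) (sT : List Char)
    (_hbj : breakAtB t j = true) (hmin : ∀ k, 0 ≤ k → k < j → breakAtB t k = false)
    (hsT : sT = ['.', ' '] ∧ rT = "period_space" ∨ sT = ['.', '\n'] ∧ rT = "period_newline" ∨
      sT = ['\n'] ∧ rT = "newline")
    (hpre : sT <+: t.drop j) (hreason : reasonAt t j = rT) :
    bcore t = (String.ofList (t.take j), reasonAt t j) := by
  have key : ∀ sub : List Char, (sub = ['.', ' '] ∨ sub = ['.', '\n'] ∨ sub = ['\n']) →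
      PySem.Chars.find t sub ≠ -1 → (j : Int) ≤ PySem.Chars.find t sub := by
    intro sub hsub hne
    obtain ⟨h0, hp, _⟩ := find_spec t sub hne
    have hge : j ≤ (PySem.Chars.find t sub).toNat := by
      by_contra hlt
      have hb := break_of_prefix t sub _ hsub hp
      rw [hmin _ (Nat.zero_le _) (by omega)] at hb
      exact Bool.noConfusion hb
    omega
  -- the find for sT equals j
  obtain ⟨hTne, hTle⟩ := find_le_of_prefix t sT j hpre
  have hTmem : sT = ['.', ' '] ∨ sT = ['.', '\n'] ∨ sT = ['\n'] := by
    rcases hsT with ⟨rfl, _⟩ | ⟨rfl, _⟩ | ⟨rfl, _⟩ <;> simp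
  have hT0 : (0 : Int) ≤ PySem.Chars.find t sT := (find_spec t sT hTne).1
  have hTeq : PySem.Chars.find t sT = (j : Int) := by
    have := key sT hTmem hTne
    omega
  -- any find equal to j must be the sT find
  have huniq : ∀ sub : List Char, (sub = ['.', ' '] ∨ sub = ['.', '\n'] ∨ sub = ['\n']) →
      sub ≠ sT → PySem.Chars.find t sub ≠ -1 → (j : Int) < PySem.Chars.find t sub := by
    intro sub hsub hne hfne
    rcases lt_or_eq_of_le (key sub hsub hfne) with h | h
    · exact h
    · exfalso
      obtain ⟨h0, hp, _⟩ := find_spec t sub hfne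
      have hpj : sub <+: t.drop j := by
        have : (PySem.Chars.find t sub).toNat = j := by omega
        rwa [this] at hp
      -- two distinct patterns cannot both be prefixes of t.drop j
      rcases hTmem with rfl | rfl | rfl <;> rcases hsub with rfl | rfl | rfl <;>
        first
          | exact hne rfl
          | exact (by decide : ¬ _ <+: _) (List.prefix_of_prefix_length_le hpj hpre (by decide))
          | exact (by decide : ¬ _ <+: _) (List.prefix_of_prefix_length_le hpre hpj (by decide))
  -- now evaluate bcore
  unfold bcore
  simp only [List.nil_append]
  set a := PySem.Chars.find t ['.', '\n'] with hadef
  set b := PySem.Chars.find t ['.', ' '] with hbdef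
  set c := PySem.Chars.find t ['\n'] with hcdef
  set c1 := (if a ≠ -1 then [(a, "period_newline")] else ([] : List (Int × String))) with hc1
  set c2 := (if b ≠ -1 then c1 ++ [(b, "period_space")] else c1) with hc2
  set c3 := (if c ≠ -1 then c2 ++ [(c, "newline")] else c2) with hc3
  have hcand : ∀ (sub : List Char) (r : String),
      (sub = ['.', ' '] ∧ r = "period_space" ∨ sub = ['.', '\n'] ∧ r = "period_newline" ∨
        sub = ['\n'] ∧ r = "newline") → PySem.Chars.find t sub ≠ -1 →
      ((PySem.Chars.find t sub, r) = (((j : Nat) : Int), rT) ∨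
        (j : Int) < PySem.Chars.find t sub) := by
    intro sub r hsr hne
    by_cases hst : sub = sT
    · left
      subst hst
      rw [hTeq]
      rcases hsT with ⟨hs1, hr1⟩ | ⟨hs1, hr1⟩ | ⟨hs1, hr1⟩ <;>
        rcases hsr with ⟨hs2, hr2⟩ | ⟨hs2, hr2⟩ | ⟨hs2, hr2⟩ <;>
          (try (rw [hs1] at hs2; exact absurd hs2 (by decide))) <;> rw [hr1, hr2]
    · right
      refine huniq sub ?_ hst hne
      rcases hsr with ⟨rfl, _⟩ | ⟨rfl, _⟩ | ⟨rfl, _⟩ <;> simp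
  have hjmem : (((j : Nat) : Int), rT) ∈ c3 := by
    rcases hsT with ⟨hs1, hr1⟩ | ⟨hs1, hr1⟩ | ⟨hs1, hr1⟩ <;>
      rw [hs1] at hTeq hTne <;>
        [rw [← hbdef] at hTeq hTne; rw [← hadef] at hTeq hTne; rw [← hcdef] at hTeq hTne] <;>
          simp [hc3, hc2, hc1, hTne, ← hTeq, hr1] <;> split_ifs <;> simp
  have hmem : ∀ x ∈ c3, x = (((j : Nat) : Int), rT) ∨ (j : Int) < x.1 := by
    intro x hx
    by_cases h1 : a = -1 <;> by_cases h2 : b = -1 <;> by_cases h3 : c = -1 <;>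
      simp [hc3, hc2, hc1, h1, h2, h3] at hx <;>
        rcases hx with rfl | rfl | rfl
    all_goals
      first
        | exact hcand ['.', '\n'] "period_newline" (by simp) (by rw [← hadef]; assumption) |>.imp
            (fun h => by rw [← hadef] at h; exact h) (fun h => by rw [← hadef] at h; exact h)
        | exact hcand ['.', ' '] "period_space" (by simp) (by rw [← hbdef]; assumption) |>.imp
            (fun h => by rw [← hbdef] at h; exact h) (fun h => by rw [← hbdef] at h; exact h)
        | exact hcand ['\n'] "newline" (by simp) (by rw [← hcdef]; assumption) |>.imp
            (fun h => by rw [← hcdef] at h; exact h) (fun h => by rw [← hcdef] at h; exact h)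
  cases hm : PySem.List.min? c3 (fun c => c.1) with
  | none =>
    rw [PySem.List.min?_eq_none_iff] at hm
    rw [hm] at hjmem
    exact absurd hjmem (List.not_mem_nil)
  | some m =>
    have hmm := PySem.List.min?_mem hm
    have hle := PySem.List.min?_isMin hm _ hjmem
    have hmeq : m = (((j : Nat) : Int), rT) := by
      rcases hmem m hmm with h | h
      · exact h
      · exfalso
        simp only at hle
        omega
    rw [hmeq]
    simp only
    rw [PySem.List.slice_to_natCast, hreason]

lemma bcore_eq (t : List Char) : bcore t = canonOut t 0 := by
  cases hfb : firstBreakFrom t 0 with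
  | none =>
    have hnb := firstBreakFrom_none t 0 hfb
    have hno : ∀ sub : List Char, (sub = ['.', ' '] ∨ sub = ['.', '\n'] ∨ sub = ['\n']) →
        PySem.Chars.find t sub = -1 := by
      intro sub hsub
      by_contra hne
      have hb := break_of_prefix t sub _ hsub (find_spec t sub hne).2.1
      rw [hnb _ (Nat.zero_le _)] at hb
      exact Bool.noConfusion hb
    unfold bcore canonOut
    rw [hfb]
    simp [hno ['.', ' '] (by simp), hno ['.', '\n'] (by simp), hno ['\n'] (by simp),
      PySem.List.min?]
  | some j =>
    obtain ⟨hbj, hmin0⟩ := firstBreakFrom_some t 0 j hfb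
    have hmin : ∀ k, 0 ≤ k → k < j → breakAtB t k = false := fun k _ hk =>
      hmin0 k (Nat.zero_le _) hk
    have hbj' : ['.', ' '] <+: t.drop j ∨ ['.', '\n'] <+: t.drop j ∨ ['\n'] <+: t.drop j := by
      simpa [breakAtB, or_assoc] using hbj
    unfold canonOut
    rw [hfb]
    rcases hbj' with hpre | hpre | hpre
    · exact bcore_case t j "period_space" ['.', ' '] hbj hmin (by simp) hpre
        (by rw [reasonAt, if_pos hpre])
    · have hnps : ¬ ['.', ' '] <+: t.drop j := fun hc =>
        (by decide : ¬ ['.', ' '] <+: ['.', '\n'])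
          (List.prefix_of_prefix_length_le hc hpre (by decide))
      exact bcore_case t j "period_newline" ['.', '\n'] hbj hmin (by simp) hpre
        (by rw [reasonAt, if_neg hnps, if_pos hpre])
    · have hnps : ¬ ['.', ' '] <+: t.drop j := fun hc =>
        (by decide : ¬ ['\n'] <+: ['.', ' '])
          (List.prefix_of_prefix_length_le hpre hc (by decide))
      have hnpn : ¬ ['.', '\n'] <+: t.drop j := fun hc =>
        (by decide : ¬ ['\n'] <+: ['.', '\n'])
          (List.prefix_of_prefix_length_le hpre hc (by decide))
      exact bcore_case t j "newline" ['\n'] hbj hmin (by simp) hpre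
        (by rw [reasonAt, if_neg hnps, if_neg hnpn, if_pos hpre])

-- ===== VERDICT (by name: the statement is the Claim_ definition above) =====
theorem extract_leading_span_spec : Claim_equal_extract_leading_span := by
  intro text _
  unfold Spec_extract_leading_span
  rw [alt_eq]
  unfold extract_leading_span
  by_cases ht : PySem.Chars.strip text.toList = []
  · simp [ht]
  · simp only [ht, if_false]
    rw [spanLoopA_eq _ _ 0 List.drop_zero, bcore_eq]
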